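-- pv_equiv track=rewrite | github.com/ayeshalovestocode/ai-whiteboard | main.py | palette_hit_test
-- ===== SOURCE A (Python) =====
-- PALETTE = [
--     (0, 0, 255),     # Red
--     (0, 255, 0),     # Green
--     (255, 0, 0),     # Blue
--     (0, 255, 255),   # Yellow
--     (255, 255, 255), # White
--     (0, 128, 255),   # Orange-ish
--     (180, 0, 180),   # Purple-ish
--     (0, 200, 200),   # Cyan-ish
--     (50, 50, 200),   # Dark blue
--     (20, 200, 20),   # Light green
--     (0, 0, 0),       # Black
--     (200, 200, 100)  # Tan-ish
-- ]
--
-- PALETTE_COLS = 6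
--
-- PALETTE_SW = 48
--
-- PALETTE_GAP = 10
--
-- PALETTE_LEFT = 12
--
-- PALETTE_TOP = 12
--
-- def palette_hit_test(x, y):
--     """x,y are client coordinates (pixel) relative to frame (not normalized). Returns palette index or None."""
--     ox = PALETTE_LEFT
--     oy = PALETTE_TOP
--     sw = PALETTE_SW
--     gap = PALETTE_GAP
--     cols = PALETTE_COLS
--     rows = (len(PALETTE) + cols - 1) // cols
--     for i in range(len(PALETTE)):
--         r = i // cols
--         c = i % cols
--         left = ox + c * (sw + gap)
--         top = oy + r * (sw + gap)
--         right = left + sw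
--         bottom = top + sw
--         if x >= left and x <= right and y >= top and y <= bottom:
--             return i
--     return None
-- ===== SOURCE B (Python) =====
-- PALETTE = [
--     (0, 0, 255), (0, 255, 0), (255, 0, 0), (0, 255, 255),
--     (255, 255, 255), (0, 128, 255), (180, 0, 180), (0, 200, 200),
--     (50, 50, 200), (20, 200, 20), (0, 0, 0), (200, 200, 100)
-- ]
-- PALETTE_COLS = 6
-- PALETTE_SW = 48
-- PALETTE_GAP = 10
-- PALETTE_LEFT = 12
-- PALETTE_TOP = 12
--
-- def palette_hit_test(x, y):
--     """x,y are client coordinates (pixel) relative to frame (not normalized). Returns palette index or None."""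
--     cx = x - PALETTE_LEFT
--     cy = y - PALETTE_TOP
--     if cx < 0 or cy < 0:
--         return None
--     pitch = PALETTE_SW + PALETTE_GAP
--     c = cx // pitch
--     r = cy // pitch
--     if cx - c * pitch <= PALETTE_SW and cy - r * pitch <= PALETTE_SW and c < PALETTE_COLS:
--         idx = r * PALETTE_COLS + c
--         if idx < len(PALETTE):
--             return idx
--     return None
-- ===== Notes on version B (the rewrite author's own statement) =====
-- stated objective: simpler
-- what changed: Replaced the O(n) scan over all palette rectangles with O(1) closed-form grid geometry: floor-divide the offset by the cell pitch to get row/column and test the within-cell offset against the swatch size.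
import Mathlib
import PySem

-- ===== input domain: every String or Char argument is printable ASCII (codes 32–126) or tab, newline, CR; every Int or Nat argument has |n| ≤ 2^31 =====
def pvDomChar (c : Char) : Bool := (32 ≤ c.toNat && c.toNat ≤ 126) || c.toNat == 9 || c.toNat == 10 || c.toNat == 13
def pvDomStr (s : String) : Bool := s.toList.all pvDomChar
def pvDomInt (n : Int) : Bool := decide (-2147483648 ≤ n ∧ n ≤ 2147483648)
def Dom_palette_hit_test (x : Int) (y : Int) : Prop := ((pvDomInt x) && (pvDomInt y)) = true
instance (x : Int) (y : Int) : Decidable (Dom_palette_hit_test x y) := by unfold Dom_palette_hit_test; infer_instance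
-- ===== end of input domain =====

-- B replaces A's linear scan over the palette rectangles with O(1) closed-form
-- grid arithmetic (floor-divide the offsets by the cell pitch); objective: simpler.

-- module constants (shared by both Pythons)
def palettePy : List (Int × Int × Int) :=
  [(0, 0, 255), (0, 255, 0), (255, 0, 0), (0, 255, 255),
   (255, 255, 255), (0, 128, 255), (180, 0, 180), (0, 200, 200),
   (50, 50, 200), (20, 200, 20), (0, 0, 0), (200, 200, 100)]
def PALETTE_COLS : Int := 6
def PALETTE_SW : Int := 48
def PALETTE_GAP : Int := 10
def PALETTE_LEFT : Int := 12
def PALETTE_TOP : Int := 12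

-- ===== PORT A =====
-- the for-loop with early return, as first-match recursion over the range list
def paletteLoopA (x y : Int) : List Int → Option Int
  | [] => none
  | i :: rest =>
    let r := PySem.Int.floordiv i PALETTE_COLS
    let c := PySem.Int.mod i PALETTE_COLS
    let left := PALETTE_LEFT + c * (PALETTE_SW + PALETTE_GAP)
    let top := PALETTE_TOP + r * (PALETTE_SW + PALETTE_GAP)
    let right := left + PALETTE_SW
    let bottom := top + PALETTE_SW
    if x ≥ left ∧ x ≤ right ∧ y ≥ top ∧ y ≤ bottom then some i
    else paletteLoopA x y rest

def palette_hit_test (x : Int) (y : Int) : Option Int :=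
  let _rows := PySem.Int.floordiv ((palettePy.length : Int) + PALETTE_COLS - 1) PALETTE_COLS
  paletteLoopA x y (PySem.List.pyRange 0 (palettePy.length : Int) 1)

-- ===== PORT B =====
def palette_hit_test_alt (x : Int) (y : Int) : Option Int :=
  let cx := x - PALETTE_LEFT
  let cy := y - PALETTE_TOP
  if cx < 0 ∨ cy < 0 then none
  else
    let pitch := PALETTE_SW + PALETTE_GAP
    let c := PySem.Int.floordiv cx pitch
    let r := PySem.Int.floordiv cy pitch
    if cx - c * pitch ≤ PALETTE_SW ∧ cy - r * pitch ≤ PALETTE_SW ∧ c < PALETTE_COLS then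
      let idx := r * PALETTE_COLS + c
      if idx < (palettePy.length : Int) then some idx else none
    else none

-- ===== PRECONDITION & SPEC =====
def Spec_palette_hit_test (x : Int) (y : Int) (out : Option Int) : Prop := out = palette_hit_test_alt x y
instance (x : Int) (y : Int) (out : Option Int) : Decidable (Spec_palette_hit_test x y out) := by unfold Spec_palette_hit_test; infer_instance

-- ===== CLAIM (what is proved, stated in full; the proofs are below) =====
def Claim_equal_palette_hit_test : Prop := ∀ (x : Int) (y : Int), Dom_palette_hit_test x y → Spec_palette_hit_test x y (palette_hit_test x y)

-- ===== LEMMAS AND PROOFS =====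

set_option maxHeartbeats 1000000 in
theorem palette_equal (x y : Int) : palette_hit_test x y = palette_hit_test_alt x y := by
  have hA : palette_hit_test x y =
       (if x ≥ 12 ∧ x ≤ 60 ∧ y ≥ 12 ∧ y ≤ 60 then some 0 else
       (if x ≥ 70 ∧ x ≤ 118 ∧ y ≥ 12 ∧ y ≤ 60 then some 1 else
       (if x ≥ 128 ∧ x ≤ 176 ∧ y ≥ 12 ∧ y ≤ 60 then some 2 else
       (if x ≥ 186 ∧ x ≤ 234 ∧ y ≥ 12 ∧ y ≤ 60 then some 3 else
       (if x ≥ 244 ∧ x ≤ 292 ∧ y ≥ 12 ∧ y ≤ 60 then some 4 else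
       (if x ≥ 302 ∧ x ≤ 350 ∧ y ≥ 12 ∧ y ≤ 60 then some 5 else
       (if x ≥ 12 ∧ x ≤ 60 ∧ y ≥ 70 ∧ y ≤ 118 then some 6 else
       (if x ≥ 70 ∧ x ≤ 118 ∧ y ≥ 70 ∧ y ≤ 118 then some 7 else
       (if x ≥ 128 ∧ x ≤ 176 ∧ y ≥ 70 ∧ y ≤ 118 then some 8 else
       (if x ≥ 186 ∧ x ≤ 234 ∧ y ≥ 70 ∧ y ≤ 118 then some 9 else
       (if x ≥ 244 ∧ x ≤ 292 ∧ y ≥ 70 ∧ y ≤ 118 then some 10 else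
       (if x ≥ 302 ∧ x ≤ 350 ∧ y ≥ 70 ∧ y ≤ 118 then some 11 else
       none)))))))))))) := rfl
  have hc := (PySem.Int.floordiv_eq_iff_of_pos
      (a := x - 12) (b := 58)
      (q := PySem.Int.floordiv (x - 12) 58)
      (by decide)).1 rfl
  have hr := (PySem.Int.floordiv_eq_iff_of_pos
      (a := y - 12) (b := 58)
      (q := PySem.Int.floordiv (y - 12) 58)
      (by decide)).1 rfl
  rw [hA]
  simp only [palette_hit_test_alt, PALETTE_COLS, PALETTE_SW, PALETTE_GAP,
    PALETTE_LEFT, PALETTE_TOP,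
    show ((palettePy.length : Nat) : Int) = 12 from by decide,
    show (48:Int) + 10 = 58 from by norm_num]
  revert hc hr
  generalize PySem.Int.floordiv (x - 12) 58 = c
  generalize PySem.Int.floordiv (y - 12) 58 = r
  intro hc hr
  by_cases h0 : x - 12 < 0 ∨ y - 12 < 0
  · rw [if_pos h0]
    repeat rw [if_neg (by omega)]
  · rw [if_neg h0]
    by_cases h1 : x - 12 - c * 58 ≤ 48 ∧ y - 12 - r * 58 ≤ 48 ∧ c < 6
    · rw [if_pos h1]
      by_cases h2 : r * 6 + c < 12
      · rw [if_pos h2]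
        have hc0 : 0 ≤ c := by omega
        have hc5 : c ≤ 5 := by omega
        have hr0 : 0 ≤ r := by omega
        have hr1 : r ≤ 1 := by omega
        interval_cases c <;> interval_cases r <;>
          (repeat rw [if_neg (by omega)]) <;>
          (try rw [if_pos (by omega)]) <;> try norm_num
      · rw [if_neg h2]
        repeat rw [if_neg (by omega)]
    · rw [if_neg h1]
      repeat rw [if_neg (by omega)]

-- ===== VERDICT (by name: the statement is the Claim_ definition above) =====
theorem palette_hit_test_spec : Claim_equal_palette_hit_test := by
  intro x y _
  unfold Spec_palette_hit_test
  exact palette_equal x y
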